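-- pv_equiv track=rewrite | github.com/millerh1/ToolUniverse | src/tooluniverse/ncbi_nucleotide_tool.py | _build_search_term
-- ===== SOURCE A (Python) =====
-- from typing import Dict, Any
--
-- def _build_search_term(arguments: Dict[str, Any]) -> str:
--     """Build NCBI search term from arguments."""
--     terms = []
--
--     # Organism filter
--     if arguments.get("organism"):
--         terms.append(f"{arguments['organism']}[Organism]")
--
--     # Gene name filter
--     if arguments.get("gene"):
--         terms.append(f"{arguments['gene']}[Gene]")
--
--     # Strain filter
--     if arguments.get("strain"):
--         terms.append(f"{arguments['strain']}[Strain]")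
--
--     # Keywords/title search
--     if arguments.get("keywords"):
--         terms.append(f"{arguments['keywords']}[Title]")
--
--     # Sequence type filter
--     if arguments.get("seq_type"):
--         seq_type = arguments["seq_type"]
--         if seq_type == "complete_genome":
--             terms.append("complete genome[Title]")
--         elif seq_type == "mrna":
--             terms.append("mRNA[Filter]")
--         elif seq_type == "refseq":
--             terms.append("RefSeq[Filter]")
--
--     # Free text query (if no specific filters provided)
--     if arguments.get("query") and not terms:
--         return arguments["query"]
--
--     # Combine terms with AND
--     if terms:
--         return " AND ".join(f"({term})" for term in terms)
--
--     return arguments.get("query", "")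
-- ===== SOURCE B (Python) =====
-- # Recursive rewrite: instead of accumulating a terms list and joining it at the
-- # end, B recurses over a spec list and builds the final "(..) AND (..)" string
-- # directly, with the query fallback only when no term was produced at all.
--
-- _SPECS = [
--     ("organism", "[Organism]"),
--     ("gene", "[Gene]"),
--     ("strain", "[Strain]"),
--     ("keywords", "[Title]"),
--     ("seq_type", None),
-- ]
--
-- _SEQ_TERMS = {
--     "complete_genome": "complete genome[Title]",
--     "mrna": "mRNA[Filter]",
--     "refseq": "RefSeq[Filter]",
-- }
--
-- def _build_search_term(arguments):
--     def go(specs):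
--         # Returns the joined string for these specs, or None if they yield no term.
--         if not specs:
--             return None
--         key, suffix = specs[0]
--         value = arguments.get(key)
--         term = None
--         if value:
--             term = value + suffix if suffix is not None else _SEQ_TERMS.get(value)
--         rest = go(specs[1:])
--         if term is None:
--             return rest
--         head = "(" + term + ")"
--         return head if rest is None else head + " AND " + rest
--     joined = go(_SPECS)
--     return joined if joined is not None else arguments.get("query", "")
-- ===== Notes on version B (the rewrite author's own statement) =====
-- stated objective: alternative
-- what changed: B drops A's intermediate terms list and final ' AND '.join entirely: a recursive pass over a spec list builds the joined '(t1) AND (t2)...' string directly (returning None when no filter fires, which triggers the single query fallback), so there is no list accumulation, no append, and no join step.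
import Mathlib
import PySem

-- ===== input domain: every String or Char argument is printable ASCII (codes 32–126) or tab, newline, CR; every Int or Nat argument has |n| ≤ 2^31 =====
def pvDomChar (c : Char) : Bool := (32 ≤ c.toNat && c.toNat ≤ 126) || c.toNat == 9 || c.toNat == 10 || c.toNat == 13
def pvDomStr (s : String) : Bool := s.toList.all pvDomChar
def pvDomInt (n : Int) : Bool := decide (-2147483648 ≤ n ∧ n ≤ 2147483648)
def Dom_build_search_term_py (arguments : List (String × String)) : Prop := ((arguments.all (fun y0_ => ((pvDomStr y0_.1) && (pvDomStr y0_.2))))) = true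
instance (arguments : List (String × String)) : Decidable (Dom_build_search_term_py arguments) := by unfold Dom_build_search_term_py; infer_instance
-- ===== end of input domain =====

-- B builds the "(t1) AND (t2)…" result string directly by recursion over a spec list,
-- with no intermediate terms list and no join; equivalence of the RETURN value is proved
-- for all association lists of strings.

-- ===== PORT A =====
-- Python's " AND ".join(f"({term})" for term in terms)
def pvJoinTerms (terms : List String) : String :=
  PySem.Str.join " AND " (terms.map (fun t => "(" ++ t ++ ")"))

def build_search_term_py (arguments : List (String × String)) : String :=
  let d : PySem.Dict String String := ⟨arguments⟩
  let terms : List String := []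
  let terms := match d.get? "organism" with
    | some v => if v ≠ "" then terms ++ [v ++ "[Organism]"] else terms
    | none => terms
  let terms := match d.get? "gene" with
    | some v => if v ≠ "" then terms ++ [v ++ "[Gene]"] else terms
    | none => terms
  let terms := match d.get? "strain" with
    | some v => if v ≠ "" then terms ++ [v ++ "[Strain]"] else terms
    | none => terms
  let terms := match d.get? "keywords" with
    | some v => if v ≠ "" then terms ++ [v ++ "[Title]"] else terms
    | none => terms
  let terms := match d.get? "seq_type" with
    | some v =>
        if v ≠ "" then
          if v = "complete_genome" then terms ++ ["complete genome[Title]"]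
          else if v = "mrna" then terms ++ ["mRNA[Filter]"]
          else if v = "refseq" then terms ++ ["RefSeq[Filter]"]
          else terms
        else terms
    | none => terms
  if d.getD "query" "" ≠ "" ∧ terms = [] then d.getD "query" ""
  else if terms ≠ [] then pvJoinTerms terms
  else d.getD "query" ""

-- ===== PORT B =====
def pvSpecs : List (String × Option String) :=
  [("organism", some "[Organism]"), ("gene", some "[Gene]"), ("strain", some "[Strain]"),
   ("keywords", some "[Title]"), ("seq_type", none)]

def pvSeqTerms : PySem.Dict String String :=
  ⟨[("complete_genome", "complete genome[Title]"), ("mrna", "mRNA[Filter]"), ("refseq", "RefSeq[Filter]")]⟩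

-- inner 'go': builds the joined string directly, none = 'these specs yield no term'
def pvGo (d : PySem.Dict String String) : List (String × Option String) → Option String
  | [] => none
  | (key, suffix) :: rest =>
    let term : Option String :=
      match d.get? key with
      | some v =>
          if v ≠ "" then
            match suffix with
            | some s => some (v ++ s)
            | none => pvSeqTerms.get? v
          else none
      | none => none
    let restJ := pvGo d rest
    match term with
    | none => restJ
    | some t =>
      let head := "(" ++ t ++ ")"
      match restJ with
      | none => some head
      | some r => some (head ++ " AND " ++ r)

def build_search_term_py_alt (arguments : List (String × String)) : String :=
  let d : PySem.Dict String String := ⟨arguments⟩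
  match pvGo d pvSpecs with
  | some s => s
  | none => d.getD "query" ""

-- ===== PRECONDITION & SPEC =====
def Spec_build_search_term_py (arguments : List (String × String)) (out : String) : Prop := out = build_search_term_py_alt arguments
instance (arguments : List (String × String)) (out : String) : Decidable (Spec_build_search_term_py arguments out) := by unfold Spec_build_search_term_py; infer_instance

-- ===== CLAIM (what is proved, stated in full; the proofs are below) =====
def Claim_equal_build_search_term_py : Prop := ∀ (arguments : List (String × String)), Dom_build_search_term_py arguments → Spec_build_search_term_py arguments (build_search_term_py arguments)

-- ===== LEMMAS AND PROOFS =====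

-- Proof-only characterisations: stepA/seqA/tailA mirror A's appends and query tail;
-- termOf is B's per-spec optional term; joinOpt ts = the joined string (none if empty).
def stepA (t : List String) (o : Option String) (suf : String) : List String :=
  match o with
  | some v => if v ≠ "" then t ++ [v ++ suf] else t
  | none => t

def seqA (t : List String) (o : Option String) : List String :=
  match o with
  | some v =>
      if v ≠ "" then
        if v = "complete_genome" then t ++ ["complete genome[Title]"]
        else if v = "mrna" then t ++ ["mRNA[Filter]"]
        else if v = "refseq" then t ++ ["RefSeq[Filter]"]
        else t
      else t
  | none => t

def tailA (q : String) (t : List String) : String :=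
  if q ≠ "" ∧ t = [] then q else if t ≠ [] then pvJoinTerms t else q

def termOf (d : PySem.Dict String String) (ks : String × Option String) : Option String :=
  match d.get? ks.1 with
  | some v =>
      if v ≠ "" then
        match ks.2 with
        | some s => some (v ++ s)
        | none => pvSeqTerms.get? v
      else none
  | none => none

def joinOpt (ts : List String) : Option String :=
  match ts with
  | [] => none
  | _ => some (pvJoinTerms ts)

theorem A_char (arguments : List (String × String)) :
    build_search_term_py arguments =
      tailA (PySem.Dict.getD (⟨arguments⟩ : PySem.Dict String String) "query" "")
        (seqA (stepA (stepA (stepA (stepA []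
            (PySem.Dict.get? (⟨arguments⟩ : PySem.Dict String String) "organism") "[Organism]")
            (PySem.Dict.get? (⟨arguments⟩ : PySem.Dict String String) "gene") "[Gene]")
            (PySem.Dict.get? (⟨arguments⟩ : PySem.Dict String String) "strain") "[Strain]")
            (PySem.Dict.get? (⟨arguments⟩ : PySem.Dict String String) "keywords") "[Title]")
          (PySem.Dict.get? (⟨arguments⟩ : PySem.Dict String String) "seq_type")) := rfl

theorem join_cons (t : String) (ts : List String) :
    pvJoinTerms (t :: ts) =
      match ts with
      | [] => "(" ++ t ++ ")"
      | _ => ("(" ++ t ++ ")") ++ " AND " ++ pvJoinTerms ts := by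
  cases ts with
  | nil => simp [pvJoinTerms, PySem.Str.join, PySem.Chars.join, List.intercalate, ← String.toList_inj]
  | cons b bs =>
    simp [pvJoinTerms, PySem.Str.join, PySem.Chars.join_cons_cons, ← String.toList_inj]

theorem pvGo_eq_joinOpt (d : PySem.Dict String String) (specs : List (String × Option String)) :
    pvGo d specs = joinOpt (specs.filterMap (termOf d)) := by
  induction specs with
  | nil => rfl
  | cons ks rest ih =>
    obtain ⟨key, suffix⟩ := ks
    show (match termOf d (key, suffix) with
          | none => pvGo d rest
          | some t =>
            match pvGo d rest with
            | none => some ("(" ++ t ++ ")")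
            | some r => some (("(" ++ t ++ ")") ++ " AND " ++ r)) = _
    rw [ih, List.filterMap_cons]
    cases h : termOf d (key, suffix) with
    | none => simp
    | some t =>
      simp only []
      cases hf : rest.filterMap (termOf d) with
      | nil => simp [joinOpt, join_cons]
      | cons b bs => simp [joinOpt, join_cons]

-- B's filterMap over pvSpecs is exactly A's append chain
set_option maxHeartbeats 2000000 in
theorem filterMap_eq_chain (d : PySem.Dict String String) :
    pvSpecs.filterMap (termOf d) =
      seqA (stepA (stepA (stepA (stepA [] (d.get? "organism") "[Organism]")
        (d.get? "gene") "[Gene]") (d.get? "strain") "[Strain]") (d.get? "keywords") "[Title]")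
        (d.get? "seq_type") := by
  have hseq : ∀ (t : List String) (o : Option String),
      seqA t o = t ++ ((match o with
        | some v => if v ≠ "" then pvSeqTerms.get? v else none
        | none => none).toList) := by
    intro t o
    cases o with
    | none => simp [seqA]
    | some v =>
      by_cases hv : v = ""
      · simp [seqA, hv]
      · by_cases hc : v = "complete_genome"
        · subst hc; simp [seqA, pvSeqTerms, PySem.Dict.get?]
        · by_cases hm : v = "mrna"
          · subst hm; simp [seqA, pvSeqTerms, PySem.Dict.get?]
          · by_cases hr : v = "refseq"
            · subst hr; simp [seqA, pvSeqTerms, PySem.Dict.get?]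
            · have c1 : ("complete_genome" == v) = false := by simp [Ne.symm hc]
              have c2 : ("mrna" == v) = false := by simp [Ne.symm hm]
              have c3 : ("refseq" == v) = false := by simp [Ne.symm hr]
              simp [seqA, pvSeqTerms, PySem.Dict.get?, hv, hc, hm, hr, c1, c2, c3]
  rw [hseq]
  simp only [pvSpecs, List.filterMap_cons, List.filterMap_nil, termOf]
  cases d.get? "organism" <;> cases d.get? "gene" <;> cases d.get? "strain" <;>
    cases d.get? "keywords" <;> cases d.get? "seq_type" <;>
    simp [stepA] <;> split_ifs <;> simp_all <;> (split <;> simp_all)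

theorem tail_eq (q : String) (ts : List String) :
    tailA q ts = (match joinOpt ts with | some s => s | none => q) := by
  cases ts <;> simp [tailA, joinOpt]

theorem build_search_term_eq (arguments : List (String × String)) :
    build_search_term_py arguments = build_search_term_py_alt arguments := by
  rw [A_char]
  show _ = (match pvGo ⟨arguments⟩ pvSpecs with
    | some s => s
    | none => PySem.Dict.getD (⟨arguments⟩ : PySem.Dict String String) "query" "")
  rw [pvGo_eq_joinOpt, filterMap_eq_chain, tail_eq]

-- ===== VERDICT (by name: the statement is the Claim_ definition above) =====
theorem build_search_term_py_spec : Claim_equal_build_search_term_py := by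
  intro arguments _
  unfold Spec_build_search_term_py
  exact build_search_term_eq arguments
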